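-- pv_equiv track=rewrite | github.com/lplaat/LeoDl | leodl.py | NumberInRange
-- ===== SOURCE A (Python) =====
-- def NumberInRange(a, b, steps):
--     found = False
--     k = 0-steps
--     for _ in range(steps*2):
--         if a == b-k:
--             found = True
--         k += 1
--     return found
-- ===== SOURCE B (Python) =====
-- def NumberInRange(a, b, steps):
--     return -steps <= b - a <= steps - 1
-- ===== Notes on version B (the rewrite author's own statement) =====
-- stated objective: faster
-- what changed: replaces the O(steps) loop that scans k from -steps to steps-1 by the closed-form interval test -steps <= b-a <= steps-1
import Mathlib
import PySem

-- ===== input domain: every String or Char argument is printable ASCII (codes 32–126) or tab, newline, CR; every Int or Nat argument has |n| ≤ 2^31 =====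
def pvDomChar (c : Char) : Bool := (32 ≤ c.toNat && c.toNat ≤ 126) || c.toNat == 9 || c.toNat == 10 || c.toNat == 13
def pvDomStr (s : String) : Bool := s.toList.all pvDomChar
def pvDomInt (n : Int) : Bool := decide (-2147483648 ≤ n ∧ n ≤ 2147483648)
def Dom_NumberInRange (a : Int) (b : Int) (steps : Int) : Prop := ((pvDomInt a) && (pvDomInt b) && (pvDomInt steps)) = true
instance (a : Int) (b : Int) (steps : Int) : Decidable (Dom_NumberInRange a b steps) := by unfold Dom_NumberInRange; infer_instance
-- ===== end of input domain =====

-- B replaces A's O(steps) scan by the closed-form interval test -steps ≤ b-a ≤ steps-1 (faster).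

-- ===== PORT A =====
def NumberInRange (a : Int) (b : Int) (steps : Int) : Bool :=
  ((PySem.List.pyRange 0 (steps * 2) 1).foldl
    (fun (s : Bool × Int) _ => ((if a == b - s.2 then true else s.1), s.2 + 1))
    (false, 0 - steps)).1

-- ===== PORT B =====
def NumberInRange_alt (a : Int) (b : Int) (steps : Int) : Bool :=
  decide (-steps ≤ b - a ∧ b - a ≤ steps - 1)

-- ===== PRECONDITION & SPEC =====
def Spec_NumberInRange (a : Int) (b : Int) (steps : Int) (out : Bool) : Prop := out = NumberInRange_alt a b steps
instance (a : Int) (b : Int) (steps : Int) (out : Bool) : Decidable (Spec_NumberInRange a b steps out) := by unfold Spec_NumberInRange; infer_instance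

-- ===== CLAIM (what is proved, stated in full; the proofs are below) =====
def Claim_equal_NumberInRange : Prop := ∀ (a : Int) (b : Int) (steps : Int), Dom_NumberInRange a b steps → Spec_NumberInRange a b steps (NumberInRange a b steps)

-- ===== LEMMAS AND PROOFS =====

-- loop invariant: the fold returns true iff the flag was set or b-a lies in [k, k + length)
theorem NumberInRange_fold (a b : Int) (l : List Int) (f : Bool) (k : Int) :
    (l.foldl (fun (s : Bool × Int) _ => ((if a == b - s.2 then true else s.1), s.2 + 1)) (f, k)).1
      = (f || decide (k ≤ b - a ∧ b - a < k + l.length)) := by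
  induction l generalizing f k with
  | nil =>
      simp only [List.foldl_nil, List.length_nil, Nat.cast_zero, add_zero]
      have h : ¬(k ≤ b - a ∧ b - a < k) := by omega
      simp [h]
  | cons x l ih =>
      simp only [List.foldl_cons, ih]
      by_cases h : a = b - k
      · simp [h]
      · have hne : (a == b - k) = false := by simp [h]
        simp only [hne, Bool.false_eq_true, if_false]
        congr 1
        simp only [decide_eq_decide, List.length_cons]
        push_cast
        omega

theorem NumberInRange_fold_spec (a b steps : Int) :
    NumberInRange a b steps = NumberInRange_alt a b steps := by
  unfold NumberInRange NumberInRange_alt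
  rw [NumberInRange_fold, PySem.List.length_pyRange_one]
  simp only [Bool.false_or, decide_eq_decide]
  omega

-- ===== VERDICT (by name: the statement is the Claim_ definition above) =====
theorem NumberInRange_spec : Claim_equal_NumberInRange := by
  intro a b steps _
  exact NumberInRange_fold_spec a b steps
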